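-- pv_equiv track=rewrite | github.com/karelplanken/fcc-coding-challenges | challenges/201_matrix_shift.py | shift_matrix
-- ===== SOURCE A (Python) =====
-- def shift_matrix(matrix: list[list[int]], shift: int) -> list[list[int]]:
--     rows = len(matrix)
--     cols = len(matrix[0])
--     total = rows * cols
--
--     # Flatten into a 1D list
--     flat = [matrix[r][c] for r in range(rows) for c in range(cols)]
--
--     # Rotate: positive shift moves values right, so we slice from the end
--     shift = shift % total
--     rotated = flat[-shift:] + flat[:-shift] if shift else flat
--
--     # Reshape back into matrix
--     return [rotated[r * cols : (r + 1) * cols] for r in range(rows)]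
-- ===== SOURCE B (Python) =====
-- def shift_matrix(matrix: list[list[int]], shift: int) -> list[list[int]]:
--     rows = len(matrix)
--     cols = len(matrix[0])
--     total = rows * cols
--     shift = shift % total
--     # Map each output cell (r, c) straight to its source cell via modular
--     # index arithmetic -- no flattening, slicing or reshaping.
--     return [
--         [matrix[(r * cols + c - shift) % total // cols]
--                [(r * cols + c - shift) % total % cols]
--          for c in range(cols)]
--         for r in range(rows)
--     ]
-- ===== Notes on version B (the rewrite author's own statement) =====
-- stated objective: alternative
-- what changed: Replaced A's flatten/slice/reshape pipeline with a double comprehension over output positions that maps each output cell (r,c) to its source cell via modular index arithmetic, reading directly from the input matrix.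
import Mathlib
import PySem

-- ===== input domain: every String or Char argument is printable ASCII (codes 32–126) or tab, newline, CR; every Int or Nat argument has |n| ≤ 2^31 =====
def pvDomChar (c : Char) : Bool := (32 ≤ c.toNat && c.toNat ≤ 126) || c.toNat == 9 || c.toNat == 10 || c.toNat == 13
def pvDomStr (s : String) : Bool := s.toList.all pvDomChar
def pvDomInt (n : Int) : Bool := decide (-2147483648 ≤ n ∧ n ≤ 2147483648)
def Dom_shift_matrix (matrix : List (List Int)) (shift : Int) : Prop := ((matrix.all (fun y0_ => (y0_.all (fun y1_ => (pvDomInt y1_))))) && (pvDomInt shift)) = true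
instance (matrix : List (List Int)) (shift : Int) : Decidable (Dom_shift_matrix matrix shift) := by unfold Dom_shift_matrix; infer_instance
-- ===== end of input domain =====

-- B replaces A's flatten/slice/reshape pipeline by mapping each output cell to its
-- source cell with modular index arithmetic (alternative decomposition, same cost).

-- ===== PORT A =====
def shift_matrix (matrix : List (List Int)) (shift : Int) : List (List Int) :=
  let rows := matrix.length
  let cols := (PySem.List.pyGetD matrix 0 []).length
  let total : Int := (rows : Int) * (cols : Int)
  -- flat = [matrix[r][c] for r in range(rows) for c in range(cols)]
  let flat := (List.range rows).flatMap (fun (r : Nat) =>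
    (List.range cols).map (fun (c : Nat) =>
      PySem.List.pyGetD (PySem.List.pyGetD matrix (r : Int) []) (c : Int) 0))
  -- shift = shift % total
  let s := PySem.Int.mod shift total
  -- rotated = flat[-shift:] + flat[:-shift] if shift else flat
  let rotated := if s ≠ 0 then
      PySem.List.slice flat (some (-s)) none ++ PySem.List.slice flat none (some (-s))
    else flat
  -- return [rotated[r*cols:(r+1)*cols] for r in range(rows)]
  (List.range rows).map (fun (r : Nat) =>
    PySem.List.slice rotated (some ((r : Int) * (cols : Int))) (some (((r : Int) + 1) * (cols : Int))))

-- ===== PORT B =====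
def shift_matrix_alt (matrix : List (List Int)) (shift : Int) : List (List Int) :=
  let rows := matrix.length
  let cols := (PySem.List.pyGetD matrix 0 []).length
  let total : Int := (rows : Int) * (cols : Int)
  let s := PySem.Int.mod shift total
  (List.range rows).map (fun (r : Nat) =>
    (List.range cols).map (fun (c : Nat) =>
      let src := PySem.Int.mod ((r : Int) * (cols : Int) + (c : Int) - s) total
      PySem.List.pyGetD
        (PySem.List.pyGetD matrix (PySem.Int.floordiv src (cols : Int)) [])
        (PySem.Int.mod src (cols : Int)) 0))

-- ===== PRECONDITION & SPEC =====
-- Pre_ excludes exactly the inputs on which the Python A raises: the empty matrix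
-- (IndexError on matrix[0]), a matrix whose first row is empty (ZeroDivisionError on
-- shift % 0), and a matrix with a row shorter than the first row (IndexError in the
-- flattening comprehension).
def Pre_shift_matrix (matrix : List (List Int)) (shift : Int) : Prop :=
  matrix ≠ [] ∧ 0 < (matrix.headD []).length ∧
    ∀ row ∈ matrix, (matrix.headD []).length ≤ row.length
instance (matrix : List (List Int)) (shift : Int) : Decidable (Pre_shift_matrix matrix shift) := by
  unfold Pre_shift_matrix; infer_instance

def pvWitness_shift_matrix : List (List Int) × Int := ([[1, 2], [3, 4]], 1)

def Spec_shift_matrix (matrix : List (List Int)) (shift : Int) (out : List (List Int)) : Prop := out = shift_matrix_alt matrix shift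
instance (matrix : List (List Int)) (shift : Int) (out : List (List Int)) : Decidable (Spec_shift_matrix matrix shift out) := by unfold Spec_shift_matrix; infer_instance

-- ===== CLAIM (what is proved, stated in full; the proofs are below) =====
def Claim_equal_shift_matrix : Prop := ∀ (matrix : List (List Int)) (shift : Int), Dom_shift_matrix matrix shift → Pre_shift_matrix matrix shift → Spec_shift_matrix matrix shift (shift_matrix matrix shift)

-- ===== LEMMAS AND PROOFS =====

-- A row-major double comprehension is a map over flat indices.
theorem flatMap_eq_map_range {α : Type} (rows cols : Nat) (f : Nat → Nat → α) :
    (List.range rows).flatMap (fun r => (List.range cols).map (fun c => f r c))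
      = (List.range (rows * cols)).map (fun i => f (i / cols) (i % cols)) := by
  induction rows with
  | zero => simp
  | succ n ih =>
    rw [List.range_succ, List.flatMap_append, ih, Nat.succ_mul, List.range_add,
        List.map_append, List.map_map, List.flatMap_singleton]
    congr 1
    apply List.map_congr_left
    intro c hc
    rw [List.mem_range] at hc
    have h1 : (n * cols + c) / cols = n := by
      rw [Nat.mul_comm n cols, Nat.mul_add_div (by omega), Nat.div_eq_of_lt hc, Nat.add_zero]
    have h2 : (n * cols + c) % cols = c := by
      rw [Nat.mul_comm n cols, Nat.mul_add_mod, Nat.mod_eq_of_lt hc]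
    simp [h1, h2]

-- Rotating a map over a range by drop/take is a map with rotated indices.
theorem rotate_map_range {α : Type} (n k : Nat) (hk : k ≤ n) (f : Nat → α) :
    (((List.range n).map f).drop k) ++ (((List.range n).map f).take k)
      = (List.range n).map (fun i => f ((i + k) % n)) := by
  apply List.ext_getElem
  · simp; omega
  · intro i h1 h2
    simp only [List.length_append, List.length_drop, List.length_take,
      List.length_map, List.length_range] at h1
    have hi : i < n := by omega
    by_cases hcase : i < n - k
    · rw [List.getElem_append_left (by simp; omega)]
      have h3 : (i + k) % n = i + k := Nat.mod_eq_of_lt (by omega)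
      simp only [List.getElem_drop, List.getElem_map, List.getElem_range, h3]
      rw [Nat.add_comm]
    · rw [List.getElem_append_right (by simp; omega)]
      have h3 : (i + k) % n = i + k - n := by
        have h4 : i + k = (i + k - n) + n := by omega
        conv_lhs => rw [h4]
        rw [Nat.add_mod_right, Nat.mod_eq_of_lt (by omega)]
      simp only [List.length_drop, List.length_map, List.length_range,
        List.getElem_take, List.getElem_map, List.getElem_range, h3]
      congr 1
      omega

-- A contiguous segment of a map over a range is a map over a shifted range.
theorem segment_map_range {α : Type} (n a m : Nat) (h : a + m ≤ n) (f : Nat → α) :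
    ((((List.range n).map f).drop a).take m) = (List.range m).map (fun c => f (a + c)) := by
  apply List.ext_getElem
  · simp; omega
  · intro i h1 h2
    simp only [List.length_take, List.length_drop, List.length_map, List.length_range] at h1
    simp

theorem shift_matrix_spec : Claim_equal_shift_matrix := by
  intro matrix shift _ hpre
  obtain ⟨hne, hcols, _⟩ := hpre
  unfold Spec_shift_matrix shift_matrix shift_matrix_alt
  dsimp only
  set rows := matrix.length with hrows
  set cols := (PySem.List.pyGetD matrix 0 []).length with hcolsdef
  have hrowspos : 0 < rows := by
    cases matrix with
    | nil => exact absurd rfl hne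
    | cons x xs => simp [hrows]
  have hcolspos : 0 < cols := by
    cases matrix with
    | nil => exact absurd rfl hne
    | cons x xs =>
      simpa [hcolsdef, PySem.List.pyGetD, PySem.List.pyGet?, PySem.List.pyIdx?] using hcols
  set total : Int := (rows : Int) * (cols : Int) with htotal
  have htotpos : 0 < total := by positivity
  set N := rows * cols with hN
  have htotN : total = (N : Int) := by push_cast [hN]; ring
  set s := PySem.Int.mod shift total with hs
  have hs0 : 0 ≤ s := PySem.Int.mod_nonneg _ htotpos
  have hslt : s < total := PySem.Int.mod_lt _ htotpos
  set sn := s.toNat with hsn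
  have hs_cast : s = (sn : Int) := by omega
  have hsnlt : sn < N := by omega
  set F : Nat → Int := fun i =>
    PySem.List.pyGetD (PySem.List.pyGetD matrix ((i / cols : Nat) : Int) []) ((i % cols : Nat) : Int) 0 with hF
  have hflat : (List.range rows).flatMap (fun (r : Nat) =>
      (List.range cols).map (fun (c : Nat) =>
        PySem.List.pyGetD (PySem.List.pyGetD matrix (r : Int) []) (c : Int) 0))
      = (List.range N).map F := by
    rw [hN, flatMap_eq_map_range]
  rw [hflat]
  set k := N - sn with hk
  have hrot : (if s ≠ 0 then
      PySem.List.slice ((List.range N).map F) (some (-s)) none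
        ++ PySem.List.slice ((List.range N).map F) none (some (-s))
    else (List.range N).map F)
      = (List.range N).map (fun i => F ((i + k) % N)) := by
    by_cases hz : s = 0
    · simp only [hz, ne_eq, not_true_eq_false, if_false]
      apply List.map_congr_left
      intro i hi
      rw [List.mem_range] at hi
      have hsz : sn = 0 := by omega
      congr 1
      rw [hk, hsz, Nat.sub_zero, Nat.add_mod_right, Nat.mod_eq_of_lt hi]
    · simp only [hz, ne_eq, not_false_eq_true, if_true]
      have hsnpos : 0 < sn := by omega
      rw [hs_cast, PySem.List.slice_from_neg_natCast _ _ hsnpos,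
          PySem.List.slice_to_neg_natCast _ _ hsnpos]
      have hlen : ((List.range N).map F).length = N := by simp
      rw [hlen]
      exact rotate_map_range N k (by omega) F
  rw [hrot]
  apply List.map_congr_left
  intro r hr
  rw [List.mem_range] at hr
  have hcast1 : ((r : Int) * (cols : Int)) = ((r * cols : Nat) : Int) := by push_cast; ring
  have hcast2 : (((r : Int) + 1) * (cols : Int)) = (((r + 1) * cols : Nat) : Int) := by push_cast; ring
  rw [hcast1, hcast2, PySem.List.slice_natCast]
  have hseg : (r + 1) * cols - r * cols = cols := by rw [Nat.succ_mul]; omega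
  rw [hseg, segment_map_range N (r * cols) cols (by rw [hN]; nlinarith) _]
  apply List.map_congr_left
  intro c hc
  rw [List.mem_range] at hc
  have hidx : r * cols + c < N := by rw [hN]; nlinarith
  have hsrc : PySem.Int.mod (((r * cols : Nat) : Int) + (c : Int) - s) total
      = (((r * cols + c + k) % N : Nat) : Int) := by
    rw [PySem.Int.mod_eq_emod_of_pos htotpos, htotN, hs_cast]
    have h1 : (((r * cols : Nat) : Int) + (c : Int) - (sn : Int))
        = ((r * cols + c + k : Nat) : Int) - (N : Int) := by push_cast [hk]; omega
    rw [h1, Int.sub_emod_right]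
    exact (Int.natCast_mod _ _).symm
  rw [hsrc, PySem.Int.floordiv_natCast, PySem.Int.mod_natCast]

-- ===== VERDICT (by name: the statement is the Claim_ definition above) =====
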